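-- pv_equiv track=rewrite | github.com/Luolingwei/LeetCode | Interview/Google/QGoogle_Find Longest Straight Line In Matrix.py | find
-- ===== SOURCE A (Python) =====
-- def find(matrix):
--
--     m, n = len(matrix), len(matrix[0])
--     dirs = [(1,0),(-1,0),(0,1),(0,-1),(-1,1),(1,-1),(-1,-1),(1,1)]
--
--     def check(i,j):
--         return 0 <= i < m and 0 <= j < n and matrix[i][j] == 1
--
--     def dfs(i,j, dir):
--         if not (0<=i<m and 0<=j<n): return 0
--         if matrix[i][j] == 0: return 0
--         else:
--             return dfs(i+dir[0], j+dir[1], dir) + 1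
--
--     res = 0
--     for i in range(m):
--         for j in range(n):
--             if matrix[i][j]==1:
--                 for k in range(len(dirs)):
--                     if not (check(i+dirs[k][0],j+dirs[k][1]) and check(i-dirs[k][0],j-dirs[k][1])):
--                         res = max(res, dfs(i,j,dirs[k]))
--     return res
-- ===== SOURCE B (Python) =====
-- def find(matrix):
--     m, n = len(matrix), len(matrix[0])
--     dirs = [(1,0),(-1,0),(0,1),(0,-1),(-1,1),(1,-1),(-1,-1),(1,1)]
--
--     def ok1(i, j):
--         return 0 <= i < m and 0 <= j < n and matrix[i][j] == 1
--
--     def best(di, dj):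
--         # DP scan in dependency order: run[(i,j)] = nonzero run length starting
--         # at (i,j) along (di,dj); the endpoint test and the running max are
--         # fused into the same single scan, so no walk is ever repeated.
--         rows = range(m - 1, -1, -1) if di == 1 else range(m)
--         cols = range(n - 1, -1, -1) if dj == 1 else range(n)
--         run = {}
--         b = 0
--         for i in rows:
--             for j in cols:
--                 r = 0 if matrix[i][j] == 0 else run.get((i + di, j + dj), 0) + 1
--                 run[(i, j)] = r
--                 if matrix[i][j] == 1 and not (ok1(i + di, j + dj) and ok1(i - di, j - dj)):
--                     b = max(b, r)
--         return b
--
--     res = 0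
--     for di, dj in dirs:
--         res = max(res, best(di, dj))
--     return res
-- ===== Notes on version B (the rewrite author's own statement) =====
-- stated objective: alternative
-- what changed: A measures each line by restarting a recursive DFS walk from every qualifying endpoint cell; B instead makes one dependency-ordered DP scan per direction that accumulates run lengths in a dictionary and fuses the endpoint test and the running maximum into that same single pass, so no walk is ever repeated and A's separate result loop disappears.
import Mathlib
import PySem

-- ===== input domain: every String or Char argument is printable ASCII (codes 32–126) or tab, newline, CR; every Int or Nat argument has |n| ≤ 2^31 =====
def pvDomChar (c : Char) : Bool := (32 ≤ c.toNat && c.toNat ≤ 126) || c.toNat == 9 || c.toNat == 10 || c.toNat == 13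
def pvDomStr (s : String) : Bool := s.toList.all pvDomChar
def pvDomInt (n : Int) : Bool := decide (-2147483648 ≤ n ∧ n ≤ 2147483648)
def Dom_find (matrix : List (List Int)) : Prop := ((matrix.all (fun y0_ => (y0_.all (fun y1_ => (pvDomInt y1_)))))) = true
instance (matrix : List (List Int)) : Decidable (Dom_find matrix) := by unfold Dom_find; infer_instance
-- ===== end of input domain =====

-- B replaces A's repeated recursive DFS walks by one fused dependency-order DP scan per
-- direction that accumulates run lengths and the running maximum in a single pass
-- (objective: alternative).

-- ===== PORT A =====
-- matrix[i][j]; total helper: all accesses the ports make are in range on Pre_-admitted inputs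
def mget (matrix : List (List Int)) (i j : Int) : Int :=
  PySem.List.pyGetD (PySem.List.pyGetD matrix i []) j 0

def findCheck (matrix : List (List Int)) (m n i j : Int) : Bool :=
  decide (0 ≤ i ∧ i < m ∧ 0 ≤ j ∧ j < n) && (mget matrix i j == 1)

-- Python's dfs; fuel only makes the recursion structural: for the eight directions used,
-- the recursion depth never reaches the fuel the ports pass (proved by the fuel lemmas below)
def findDfs (matrix : List (List Int)) (m n di dj : Int) : Nat → Int → Int → Int
  | 0, _, _ => 0
  | fuel + 1, i, j =>
    if ¬(0 ≤ i ∧ i < m ∧ 0 ≤ j ∧ j < n) then 0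
    else if mget matrix i j == 0 then 0
    else findDfs matrix m n di dj fuel (i + di) (j + dj) + 1

def findFuel (m n : Int) : Nat := (m + n + 2).toNat

def find (matrix : List (List Int)) : Int :=
  let m : Int := matrix.length
  let n : Int := (PySem.List.pyGetD matrix 0 []).length
  let dirs : List (Int × Int) := [(1,0),(-1,0),(0,1),(0,-1),(-1,1),(1,-1),(-1,-1),(1,1)]
  (PySem.List.pyRange 0 m).foldl (fun res i =>
    (PySem.List.pyRange 0 n).foldl (fun res j =>
      if mget matrix i j == 1 then
        (PySem.List.pyRange 0 (dirs.length : Int)).foldl (fun res k =>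
          let d := PySem.List.pyGetD dirs k (0, 0)
          if !(findCheck matrix m n (i + d.1) (j + d.2) && findCheck matrix m n (i - d.1) (j - d.2)) then
            max res (findDfs matrix m n d.1 d.2 (findFuel m n) i j)
          else res) res
      else res) res) 0

-- ===== PORT B =====
def altOk (matrix : List (List Int)) (m n i j : Int) : Bool :=
  decide (0 ≤ i) && decide (i < m) && decide (0 ≤ j) && decide (j < n) && (mget matrix i j == 1)

-- one step of the fused scan: store the run length of the current cell, then fold it
-- into the running maximum when the cell is a qualifying endpoint
def altStep (matrix : List (List Int)) (m n di dj : Int)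
    (s : PySem.Dict (Int × Int) Int × Int) (i j : Int) : PySem.Dict (Int × Int) Int × Int :=
  let r : Int := if mget matrix i j == 0 then 0 else s.1.getD (i + di, j + dj) 0 + 1
  (s.1.insert (i, j) r,
   if (mget matrix i j == 1) &&
      !(altOk matrix m n (i + di) (j + dj) && altOk matrix m n (i - di) (j - dj)) then
     max s.2 r
   else s.2)

def altBest (matrix : List (List Int)) (m n di dj : Int) : Int :=
  let rows := if di == 1 then PySem.List.pyRange (m - 1) (-1) (-1) else PySem.List.pyRange 0 m
  let cols := if dj == 1 then PySem.List.pyRange (n - 1) (-1) (-1) else PySem.List.pyRange 0 n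
  (rows.foldl (fun s i => cols.foldl (fun s j => altStep matrix m n di dj s i j) s)
    ((PySem.Dict.empty : PySem.Dict (Int × Int) Int), (0 : Int))).2

def find_alt (matrix : List (List Int)) : Int :=
  let m : Int := matrix.length
  let n : Int := (PySem.List.pyGetD matrix 0 []).length
  let dirs : List (Int × Int) := [(1,0),(-1,0),(0,1),(0,-1),(-1,1),(1,-1),(-1,-1),(1,1)]
  dirs.foldl (fun res d => max res (altBest matrix m n d.1 d.2)) 0

-- ===== PRECONDITION & SPEC =====
-- Pre_ excludes exactly the inputs where Python A raises IndexError: the empty matrix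
-- (matrix[0]) and matrices with a row shorter than the first row (matrix[i][j] with j < n).
def Pre_find (matrix : List (List Int)) : Prop :=
  matrix ≠ [] ∧ ∀ row ∈ matrix, (matrix.headD []).length ≤ row.length
instance (matrix : List (List Int)) : Decidable (Pre_find matrix) := by unfold Pre_find; infer_instance

def pvWitness_find : List (List Int) := [[1, 0], [0, 1]]

def Spec_find (matrix : List (List Int)) (out : Int) : Prop := out = find_alt matrix
instance (matrix : List (List Int)) (out : Int) : Decidable (Spec_find matrix out) := by unfold Spec_find; infer_instance

-- ===== CLAIM (what is proved, stated in full; the proofs are below) =====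
def Claim_equal_find : Prop := ∀ (matrix : List (List Int)), Dom_find matrix → Pre_find matrix → Spec_find matrix (find matrix)

-- ===== LEMMAS AND PROOFS =====

-- in-bounds predicate and the per-direction fuel bound of A's dfs
def pvInB (m n : Int) (c : Int × Int) : Prop := 0 ≤ c.1 ∧ c.1 < m ∧ 0 ≤ c.2 ∧ c.2 < n

def pvDirOK (di dj : Int) : Prop := (di = 1 ∨ di = -1) ∨ (di = 0 ∧ (dj = 1 ∨ dj = -1))

def pvBound (m n di dj : Int) (c : Int × Int) : Nat :=
  (if di = 1 then m - c.1 else if di = -1 then c.1 + 1 else if dj = 1 then n - c.2 else c.2 + 1).toNat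

lemma pvDfs_zero (matrix : List (List Int)) (m n di dj i j : Int) :
    findDfs matrix m n di dj 0 i j = 0 := rfl

lemma pvDfs_unfold (matrix : List (List Int)) (m n di dj : Int) (f : Nat) (i j : Int) :
    findDfs matrix m n di dj (f + 1) i j =
      if ¬(0 ≤ i ∧ i < m ∧ 0 ≤ j ∧ j < n) then 0
      else if mget matrix i j == 0 then 0
      else findDfs matrix m n di dj f (i + di) (j + dj) + 1 := rfl

lemma pvDfs_notInB (matrix : List (List Int)) (m n di dj : Int) (f : Nat) (i j : Int)
    (h : ¬ pvInB m n (i, j)) (hf : 1 ≤ f) : findDfs matrix m n di dj f i j = 0 := by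
  obtain ⟨f, rfl⟩ : ∃ g, f = g + 1 := ⟨f - 1, by omega⟩
  rw [pvDfs_unfold, if_pos]
  simpa [pvInB] using h

lemma pvDfs_succ (matrix : List (List Int)) (m n di dj : Int) (hd : pvDirOK di dj) :
    ∀ (f : Nat) (i j : Int), pvBound m n di dj (i, j) ≤ f →
      findDfs matrix m n di dj (f + 1) i j = findDfs matrix m n di dj f i j := by
  intro f
  induction f with
  | zero =>
    intro i j hb
    rw [pvDfs_zero, pvDfs_unfold]
    by_cases hib : 0 ≤ i ∧ i < m ∧ 0 ≤ j ∧ j < n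
    · exfalso
      unfold pvBound at hb
      rcases hd with (rfl | rfl) | ⟨rfl, (rfl | rfl)⟩ <;> norm_num at hb <;> omega
    · rw [if_pos hib]
  | succ f ih =>
    intro i j hb
    rw [pvDfs_unfold matrix m n di dj (f + 1) i j, pvDfs_unfold matrix m n di dj f i j]
    by_cases hib : 0 ≤ i ∧ i < m ∧ 0 ≤ j ∧ j < n
    · rw [if_neg (not_not_intro hib), if_neg (not_not_intro hib)]
      by_cases hz : mget matrix i j == 0
      · rw [if_pos hz, if_pos hz]
      · rw [if_neg hz, if_neg hz]
        congr 1
        apply ih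
        unfold pvBound at hb ⊢
        rcases hd with (rfl | rfl) | ⟨rfl, (rfl | rfl)⟩ <;> norm_num at hb ⊢ <;> omega
    · rw [if_pos hib, if_pos hib]

-- guard, value and max-step of a single (cell, direction) candidate
def pvG (matrix : List (List Int)) (m n di dj : Int) (c : Int × Int) : Bool :=
  (mget matrix c.1 c.2 == 1) &&
    !(findCheck matrix m n (c.1 + di) (c.2 + dj) && findCheck matrix m n (c.1 - di) (c.2 - dj))

def pvV (matrix : List (List Int)) (m n di dj : Int) (c : Int × Int) : Int :=
  findDfs matrix m n di dj (findFuel m n) c.1 c.2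

def pvGStep (matrix : List (List Int)) (m n di dj : Int) (b : Int) (c : Int × Int) : Int :=
  if pvG matrix m n di dj c then max b (pvV matrix m n di dj c) else b

def pvH (matrix : List (List Int)) (m n : Int) (r : Int) (p : (Int × Int) × (Int × Int)) : Int :=
  pvGStep matrix m n p.2.1 p.2.2 r p.1

lemma pvAltOk_eq (matrix : List (List Int)) (m n i j : Int) :
    altOk matrix m n i j = findCheck matrix m n i j := by
  unfold altOk findCheck
  by_cases h1 : 0 ≤ i <;> by_cases h2 : i < m <;> by_cases h3 : 0 ≤ j <;> by_cases h4 : j < n <;>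
    simp [h1, h2, h3, h4]

-- the cell list a nested row/column loop walks, flattened
def pvCells (rs cs : List Int) : List (Int × Int) := rs.flatMap (fun i => cs.map (fun j => (i, j)))

def pvRowsD (m di : Int) : List Int :=
  if di == 1 then PySem.List.pyRange (m - 1) (-1) (-1) else PySem.List.pyRange 0 m

def pvColsD (n dj : Int) : List Int :=
  if dj == 1 then PySem.List.pyRange (n - 1) (-1) (-1) else PySem.List.pyRange 0 n

lemma pvFoldl_flatMap {α β γ : Type} (l : List α) (g : α → List β) (f : γ → β → γ) (init : γ) :
    (l.flatMap g).foldl f init = l.foldl (fun a x => (g x).foldl f a) init := by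
  induction l generalizing init with
  | nil => rfl
  | cons x t ih => simp [List.flatMap_cons, List.foldl_append, ih]

lemma pvAltBest_eq_flat (matrix : List (List Int)) (m n di dj : Int) :
    altBest matrix m n di dj =
      ((pvCells (pvRowsD m di) (pvColsD n dj)).foldl
        (fun s c => altStep matrix m n di dj s c.1 c.2)
        ((PySem.Dict.empty : PySem.Dict (Int × Int) Int), (0 : Int))).2 := by
  have h : ∀ (rows cols : List Int) (s0 : PySem.Dict (Int × Int) Int × Int),
      rows.foldl (fun s i => cols.foldl (fun s j => altStep matrix m n di dj s i j) s) s0 =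
        (pvCells rows cols).foldl (fun s c => altStep matrix m n di dj s c.1 c.2) s0 := by
    intro rows cols s0
    unfold pvCells
    rw [pvFoldl_flatMap]
    apply PySem.List.foldl_congr_mem
    intro a x _
    rw [List.foldl_map]
  show ((pvRowsD m di).foldl
      (fun s i => (pvColsD n dj).foldl (fun s j => altStep matrix m n di dj s i j) s)
      ((PySem.Dict.empty : PySem.Dict (Int × Int) Int), (0 : Int))).2 = _
  rw [h]

lemma pvMem_cells (rs cs : List Int) (c : Int × Int) :
    c ∈ pvCells rs cs ↔ c.1 ∈ rs ∧ c.2 ∈ cs := by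
  obtain ⟨a, b⟩ := c
  simp [pvCells, List.mem_flatMap, and_comm]

-- processing order: every cell's (di,dj)-neighbour is out of bounds or already written
def pvOrd (m n di dj : Int) : List (Int × Int) → ((Int × Int) → Prop) → Prop
  | [], _ => True
  | c :: t, W => (¬ pvInB m n (c.1 + di, c.2 + dj) ∨ W (c.1 + di, c.2 + dj)) ∧
      pvOrd m n di dj t (fun x => W x ∨ x = c)

lemma pvOrd_mono (m n di dj : Int) :
    ∀ (L : List (Int × Int)) (W W' : (Int × Int) → Prop), (∀ c, W c → W' c) →
      pvOrd m n di dj L W → pvOrd m n di dj L W' := by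
  intro L
  induction L with
  | nil => intro W W' _ _; trivial
  | cons c t ih =>
    intro W W' hWW h
    refine ⟨h.1.imp id (hWW _), ih _ _ ?_ h.2⟩
    rintro x (hx | hx)
    · exact Or.inl (hWW _ hx)
    · exact Or.inr hx

lemma pvOrd_of_forall (m n di dj : Int) :
    ∀ (L : List (Int × Int)) (W : (Int × Int) → Prop),
      (∀ c ∈ L, ¬ pvInB m n (c.1 + di, c.2 + dj) ∨ W (c.1 + di, c.2 + dj)) →
      pvOrd m n di dj L W := by
  intro L
  induction L with
  | nil => intro _ _; trivial
  | cons c t ih =>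
    intro W h
    refine ⟨h c (by simp), ?_⟩
    exact pvOrd_mono m n di dj t W _ (fun x hx => Or.inl hx) (ih _ (fun x hx => h x (by simp [hx])))

lemma pvOrd_append (m n di dj : Int) :
    ∀ (L1 L2 : List (Int × Int)) (W : (Int × Int) → Prop),
      pvOrd m n di dj L1 W → pvOrd m n di dj L2 (fun x => W x ∨ x ∈ L1) →
      pvOrd m n di dj (L1 ++ L2) W := by
  intro L1
  induction L1 with
  | nil =>
    intro L2 W _ h2
    simpa using pvOrd_mono m n di dj L2 _ W (by rintro x (hx | hx); exact hx; simp at hx) h2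
  | cons c t ih =>
    intro L2 W h1 h2
    refine ⟨h1.1, ih L2 _ h1.2 ?_⟩
    apply pvOrd_mono m n di dj L2 _ _ _ h2
    rintro x (hx | hx)
    · exact Or.inl (Or.inl hx)
    · rcases List.mem_cons.mp hx with rfl | hx
      · exact Or.inl (Or.inr rfl)
      · exact Or.inr hx

-- the fused scan computes the guarded max-fold of the dfs values, in scan order
lemma pvCoreB (matrix : List (List Int)) (m n di dj : Int) (hd : pvDirOK di dj)
    (hm : 0 ≤ m) (hn : 0 ≤ n) :
    ∀ (L : List (Int × Int)) (run : PySem.Dict (Int × Int) Int) (b : Int),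
      (∀ c ∈ L, pvInB m n c) →
      (∀ c, run.contains c = true →
        pvInB m n c ∧ run.getD c 0 = pvV matrix m n di dj c) →
      pvOrd m n di dj L (fun c => run.contains c = true) →
      (L.foldl (fun s c => altStep matrix m n di dj s c.1 c.2) (run, b)).2 =
        L.foldl (pvGStep matrix m n di dj) b := by
  intro L
  induction L with
  | nil => intro run b _ _ _; rfl
  | cons c0 t ih =>
    intro run b hmem hcorr hord
    obtain ⟨hord1, hord2⟩ := hord
    have hinB0 : pvInB m n c0 := hmem c0 (by simp)
    have hm1 : 1 ≤ m := by rcases hinB0 with ⟨h1, h2, _⟩; omega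
    have hn1 : 1 ≤ n := by rcases hinB0 with ⟨_, _, h3, h4⟩; omega
    have hfuel : findFuel m n = (m + n + 1).toNat + 1 := by unfold findFuel; omega
    -- the run length written at c0 is the dfs value at c0
    have hval : (if mget matrix c0.1 c0.2 == 0 then 0 else run.getD (c0.1 + di, c0.2 + dj) 0 + 1) =
        pvV matrix m n di dj c0 := by
      unfold pvV
      rw [hfuel, pvDfs_unfold]
      rw [if_neg (not_not_intro (by rcases hinB0 with ⟨h1, h2, h3, h4⟩; exact ⟨h1, h2, h3, h4⟩))]
      by_cases hz : mget matrix c0.1 c0.2 == 0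
      · rw [if_pos hz, if_pos hz]
      · rw [if_neg hz, if_neg hz]
        congr 1
        rcases hord1 with hnb | hW
        · have hnc : run.contains (c0.1 + di, c0.2 + dj) = false := by
            cases h : run.contains (c0.1 + di, c0.2 + dj)
            · rfl
            · exact absurd (hcorr _ h).1 hnb
          rw [PySem.Dict.getD_of_not_contains _ _ hnc]
          rw [pvDfs_notInB matrix m n di dj _ _ _ hnb (by omega)]
        · obtain ⟨hnbB, hnbV⟩ := hcorr _ hW
          rw [hnbV]
          unfold pvV
          rw [hfuel]
          exact pvDfs_succ matrix m n di dj hd ((m + n + 1).toNat) (c0.1 + di) (c0.2 + dj) (by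
            unfold pvBound
            rcases hnbB with ⟨h1, h2, h3, h4⟩
            rcases hd with (rfl | rfl) | ⟨rfl, (rfl | rfl)⟩ <;> norm_num <;> omega)
    have hstep : altStep matrix m n di dj (run, b) c0.1 c0.2 =
        (run.insert c0 (pvV matrix m n di dj c0), pvGStep matrix m n di dj b c0) := by
      unfold altStep pvGStep pvG
      rw [pvAltOk_eq, pvAltOk_eq]
      simp only [hval]
    -- the updated dict still satisfies the correctness invariant
    have hcorr' : ∀ x, (run.insert c0 (pvV matrix m n di dj c0)).contains x = true →
        pvInB m n x ∧ (run.insert c0 (pvV matrix m n di dj c0)).getD x 0 =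
          pvV matrix m n di dj x := by
      intro x hx
      by_cases hxc : x = c0
      · subst hxc
        exact ⟨hinB0, by rw [PySem.Dict.getD_insert_self]⟩
      · rw [PySem.Dict.contains_insert] at hx
        have hx' : run.contains x = true := by
          cases h : run.contains x
          · rw [h] at hx; simp [hxc] at hx
          · rfl
        refine ⟨(hcorr x hx').1, ?_⟩
        rw [PySem.Dict.getD_insert, if_neg hxc]
        exact (hcorr x hx').2
    have hord' : pvOrd m n di dj t
        (fun x => (run.insert c0 (pvV matrix m n di dj c0)).contains x = true) := by
      apply pvOrd_mono m n di dj t _ _ _ hord2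
      rintro x (hx | rfl)
      · rw [PySem.Dict.contains_insert, hx, Bool.or_true]
      · rw [PySem.Dict.contains_insert]; simp
    rw [List.foldl_cons, List.foldl_cons, hstep]
    exact ih _ _ (fun x hx => hmem x (List.mem_cons_of_mem _ hx)) hcorr' hord'

-- ordering facts for the scan orders B uses
lemma pvOrd_rows (m n di dj : Int) (hdi : di ≠ 0) (cs : List Int)
    (hcs : ∀ j, 0 ≤ j → j < n → j ∈ cs) :
    ∀ (rs : List Int) (W : (Int × Int) → Prop),
      rs.Pairwise (fun a b => a + di ≠ b) →
      (∀ i ∈ rs, 0 ≤ i + di → i + di < m → i + di ∉ rs →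
        ∀ j', 0 ≤ j' → j' < n → W (i + di, j')) →
      pvOrd m n di dj (pvCells rs cs) W := by
  intro rs
  induction rs with
  | nil => intro W _ _; trivial
  | cons i t ihr =>
    intro W hp hW
    obtain ⟨hphead, hptail⟩ := List.pairwise_cons.mp hp
    have hsplit : pvCells (i :: t) cs = (cs.map (fun j => (i, j))) ++ pvCells t cs := by
      simp [pvCells, List.flatMap_cons]
    rw [hsplit]
    apply pvOrd_append
    · apply pvOrd_of_forall
      intro c hc
      obtain ⟨j, hj, rfl⟩ := List.mem_map.mp hc
      by_cases hB : pvInB m n (i + di, j + dj)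
      · right
        obtain ⟨hb1, hb2, hb3, hb4⟩ := hB
        exact hW i (by simp) hb1 hb2 (by
          intro hmem
          rcases List.mem_cons.mp hmem with he | he
          · exact hdi (by omega)
          · exact hphead _ he rfl) _ hb3 hb4
      · exact Or.inl hB
    · apply ihr _ hptail
      intro i' hi' h1 h2 hnot j' hj0 hjn
      by_cases he : i' + di = i
      · right
        rw [List.mem_map]
        exact ⟨j', hcs j' hj0 hjn, by rw [he]⟩
      · left
        exact hW i' (List.mem_cons_of_mem _ hi') h1 h2 (by
          intro hmem
          rcases List.mem_cons.mp hmem with h | h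
          · exact he h
          · exact hnot h) j' hj0 hjn

lemma pvOrd_row0 (m n dj : Int) (hdj : dj ≠ 0) :
    ∀ (cs' : List Int) (W : (Int × Int) → Prop) (i : Int),
      cs'.Pairwise (fun a b => a + dj ≠ b) →
      (∀ j ∈ cs', 0 ≤ j + dj → j + dj < n → j + dj ∉ cs' → W (i, j + dj)) →
      pvOrd m n 0 dj (cs'.map (fun j => (i, j))) W := by
  intro cs'
  induction cs' with
  | nil => intro W i _ _; trivial
  | cons j t ihc =>
    intro W i hp hW
    obtain ⟨hphead, hptail⟩ := List.pairwise_cons.mp hp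
    rw [List.map_cons]
    refine ⟨?_, ?_⟩
    · by_cases hB : pvInB m n ((i, j).1 + 0, (i, j).2 + dj)
      · right
        obtain ⟨hb1, hb2, hb3, hb4⟩ := hB
        have : W (i, j + dj) := hW j (by simp) hb3 hb4 (by
          intro hmem
          rcases List.mem_cons.mp hmem with he | he
          · exact hdj (by omega)
          · exact hphead _ he rfl)
        simpa using this
      · exact Or.inl hB
    · apply pvOrd_mono m n 0 dj _ (fun x => W x ∨ x = (i, j)) _ (fun c h => h)
      apply ihc _ i hptail
      intro j' hj' h1 h2 hnot
      by_cases he : j' + dj = j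
      · right; rw [he]
      · left
        exact hW j' (List.mem_cons_of_mem _ hj') h1 h2 (by
          intro hmem
          rcases List.mem_cons.mp hmem with h | h
          · exact he h
          · exact hnot h)

lemma pvOrd_cols (m n dj : Int) (hdj : dj ≠ 0) (cs : List Int)
    (hcs : ∀ j, 0 ≤ j → j < n → j ∈ cs)
    (hp : cs.Pairwise (fun a b => a + dj ≠ b)) :
    ∀ (rs : List Int) (W : (Int × Int) → Prop), pvOrd m n 0 dj (pvCells rs cs) W := by
  intro rs
  induction rs with
  | nil => intro W; trivial
  | cons i t ihr =>
    intro W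
    have hsplit : pvCells (i :: t) cs = (cs.map (fun j => (i, j))) ++ pvCells t cs := by
      simp [pvCells, List.flatMap_cons]
    rw [hsplit]
    apply pvOrd_append
    · apply pvOrd_row0 m n dj hdj cs W i hp
      intro j hj h1 h2 hnot
      exact absurd (hcs _ h1 h2) hnot
    · exact ihr _

lemma pvRange_asc_pairwise (a b : Int) : (PySem.List.pyRange a b).Pairwise (· < ·) := by
  rw [PySem.List.pyRange_one]
  rw [List.pairwise_map]
  apply List.Pairwise.imp ?_ List.pairwise_lt_range
  intro x y h
  omega

lemma pvRange_desc_pairwise (a b : Int) : (PySem.List.pyRange a b (-1)).Pairwise (· > ·) := by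
  rw [PySem.List.pyRange_neg_one_eq_reverse, List.pairwise_reverse]
  exact pvRange_asc_pairwise _ _

lemma pvMem_rowsD (m di i : Int) : i ∈ pvRowsD m di ↔ 0 ≤ i ∧ i < m := by
  unfold pvRowsD
  by_cases h : di = 1 <;>
    (simp [h, PySem.List.mem_pyRange_neg_one, PySem.List.mem_pyRange_one]; try omega)

lemma pvMem_colsD (n dj j : Int) : j ∈ pvColsD n dj ↔ 0 ≤ j ∧ j < n := by
  unfold pvColsD
  by_cases h : dj = 1 <;>
    (simp [h, PySem.List.mem_pyRange_neg_one, PySem.List.mem_pyRange_one]; try omega)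

-- B's per-direction scan equals the guarded max-fold over its cell list
lemma pvAltBest_eq (matrix : List (List Int)) (m n di dj : Int) (hd : pvDirOK di dj)
    (hm : 0 ≤ m) (hn : 0 ≤ n) :
    altBest matrix m n di dj =
      (pvCells (pvRowsD m di) (pvColsD n dj)).foldl (pvGStep matrix m n di dj) 0 := by
  rw [pvAltBest_eq_flat]
  apply pvCoreB matrix m n di dj hd hm hn
  · intro c hc
    obtain ⟨h1, h2⟩ := (pvMem_cells _ _ c).mp hc
    obtain ⟨h1a, h1b⟩ := (pvMem_rowsD m di c.1).mp h1
    obtain ⟨h2a, h2b⟩ := (pvMem_colsD n dj c.2).mp h2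
    exact ⟨h1a, h1b, h2a, h2b⟩
  · intro c hc
    rw [PySem.Dict.contains_empty] at hc
    exact absurd hc (by simp)
  · -- the scan order writes a cell's (di,dj)-neighbour first (or it is out of bounds)
    have hccover : ∀ j, 0 ≤ j → j < n → j ∈ pvColsD n dj :=
      fun j h1 h2 => (pvMem_colsD n dj j).mpr ⟨h1, h2⟩
    rcases hd with (hd1 | hd1) | ⟨hd0, hdj⟩
    · subst hd1
      apply pvOrd_rows m n 1 dj (by norm_num) _ hccover
      · unfold pvRowsD
        rw [if_pos (by norm_num)]
        apply List.Pairwise.imp ?_ (pvRange_desc_pairwise (m - 1) (-1))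
        intro a b h
        omega
      · intro i hi h1 h2 hnot
        exact absurd ((pvMem_rowsD m 1 _).mpr ⟨h1, h2⟩) hnot
    · subst hd1
      apply pvOrd_rows m n (-1) dj (by norm_num) _ hccover
      · unfold pvRowsD
        rw [if_neg (by norm_num)]
        apply List.Pairwise.imp ?_ (pvRange_asc_pairwise 0 m)
        intro a b h
        omega
      · intro i hi h1 h2 hnot
        exact absurd ((pvMem_rowsD m (-1) _).mpr ⟨h1, h2⟩) hnot
    · subst hd0
      have hp : (pvColsD n dj).Pairwise (fun a b => a + dj ≠ b) := by
        unfold pvColsD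
        rcases hdj with rfl | rfl
        · rw [if_pos (by norm_num)]
          apply List.Pairwise.imp ?_ (pvRange_desc_pairwise (n - 1) (-1))
          intro a b h
          omega
        · rw [if_neg (by norm_num)]
          apply List.Pairwise.imp ?_ (pvRange_asc_pairwise 0 n)
          intro a b h
          omega
      exact pvOrd_cols m n dj (by rcases hdj with rfl | rfl <;> norm_num) _ hccover hp _ _

-- max-fold algebra: pull an initial max out of a guarded max-fold
lemma pvGStep_fold_max (matrix : List (List Int)) (m n di dj : Int) :
    ∀ (L : List (Int × Int)) (a b : Int),
      L.foldl (pvGStep matrix m n di dj) (max a b) =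
        max a (L.foldl (pvGStep matrix m n di dj) b) := by
  intro L
  induction L with
  | nil => intro a b; rfl
  | cons c t ih =>
    intro a b
    rw [List.foldl_cons, List.foldl_cons]
    have hstep : pvGStep matrix m n di dj (max a b) c = max a (pvGStep matrix m n di dj b c) := by
      unfold pvGStep
      split_ifs with h
      · rw [max_assoc]
      · rfl
    rw [hstep, ih]

-- the big candidate lists both programs fold over
def pvDirsL : List (Int × Int) := [(1,0),(-1,0),(0,1),(0,-1),(-1,1),(1,-1),(-1,-1),(1,1)]

def pvBigA (m n : Int) : List ((Int × Int) × (Int × Int)) :=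
  (pvCells (PySem.List.pyRange 0 m) (PySem.List.pyRange 0 n)).flatMap
    (fun c => pvDirsL.map (fun d => (c, d)))

def pvBigB (m n : Int) : List ((Int × Int) × (Int × Int)) :=
  pvDirsL.flatMap (fun d => (pvCells (pvRowsD m d.1) (pvColsD n d.2)).map (fun c => (c, d)))

lemma pvFold_fuse (matrix : List (List Int)) (m n : Int) (hm : 0 ≤ m) (hn : 0 ≤ n) :
    ∀ (ds : List (Int × Int)), (∀ d ∈ ds, pvDirOK d.1 d.2) → ∀ (a : Int), 0 ≤ a →
      ds.foldl (fun res d => max res (altBest matrix m n d.1 d.2)) a =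
      ds.foldl (fun res d =>
        ((pvCells (pvRowsD m d.1) (pvColsD n d.2)).map (fun c => (c, d))).foldl
          (pvH matrix m n) res) a := by
  intro ds
  induction ds with
  | nil => intro _ a _; rfl
  | cons d t ih =>
    intro hok a ha
    rw [List.foldl_cons, List.foldl_cons]
    have hmap : ((pvCells (pvRowsD m d.1) (pvColsD n d.2)).map (fun c => (c, d))).foldl
        (pvH matrix m n) a =
        (pvCells (pvRowsD m d.1) (pvColsD n d.2)).foldl (pvGStep matrix m n d.1 d.2) a := by
      rw [List.foldl_map]
      rfl
    have hfuse : (pvCells (pvRowsD m d.1) (pvColsD n d.2)).foldl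
        (pvGStep matrix m n d.1 d.2) a = max a (altBest matrix m n d.1 d.2) := by
      rw [pvAltBest_eq matrix m n d.1 d.2 (hok d (by simp)) hm hn]
      have ha0 : a = max a 0 := by omega
      conv_lhs => rw [ha0]
      rw [pvGStep_fold_max]
    rw [hmap, hfuse]
    exact ih (fun x hx => hok x (List.mem_cons_of_mem _ hx)) _
      (le_trans ha (le_max_left _ _))

lemma pvDirsL_ok : ∀ d ∈ pvDirsL, pvDirOK d.1 d.2 := by
  intro d hd
  fin_cases hd <;> simp [pvDirOK]

lemma pvB_eq_bigB (matrix : List (List Int)) :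
    find_alt matrix =
      (pvBigB (matrix.length : Int) ((PySem.List.pyGetD matrix 0 []).length : Int)).foldl
        (pvH matrix (matrix.length : Int) ((PySem.List.pyGetD matrix 0 []).length : Int)) 0 := by
  unfold pvBigB
  rw [pvFoldl_flatMap]
  show pvDirsL.foldl (fun res d => max res (altBest matrix (matrix.length : Int)
      ((PySem.List.pyGetD matrix 0 []).length : Int) d.1 d.2)) 0 = _
  exact pvFold_fuse matrix _ _ (Int.natCast_nonneg _) (Int.natCast_nonneg _) pvDirsL
    pvDirsL_ok 0 le_rfl

-- A's triple loop equals the fold of pvH over its candidate list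
lemma pvA_eq_bigA (matrix : List (List Int)) :
    find matrix =
      (pvBigA (matrix.length : Int) ((PySem.List.pyGetD matrix 0 []).length : Int)).foldl
        (pvH matrix (matrix.length : Int) ((PySem.List.pyGetD matrix 0 []).length : Int)) 0 := by
  unfold find pvBigA
  rw [pvFoldl_flatMap]
  unfold pvCells
  rw [pvFoldl_flatMap]
  apply PySem.List.foldl_congr_mem
  intro res i _
  rw [List.foldl_map]
  apply PySem.List.foldl_congr_mem
  intro res2 j _
  show _ = (pvDirsL.map (fun d => ((i, j), d))).foldl (pvH matrix _ _) res2
  rw [List.foldl_map]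
  by_cases h1 : (mget matrix i j == 1) = true
  · rw [if_pos h1]
    simp only [List.length_cons, List.length_nil]
    rw [show ((0 + 1 + 1 + 1 + 1 + 1 + 1 + 1 + 1 : Nat) : Int) = (8 : Int) from by norm_num,
        show PySem.List.pyRange 0 (8 : Int) = [0, 1, 2, 3, 4, 5, 6, 7] from by decide]
    norm_num [pvDirsL, pvH, pvGStep, pvG, pvV, PySem.List.pyGetD_ofNat', h1]

  · rw [if_neg h1]
    simp only [Bool.not_eq_true] at h1
    simp [pvDirsL, pvH, pvGStep, pvG, h1]

-- the two candidate lists are permutations of one another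
lemma pvNodup_cells (rs cs : List Int) (h1 : rs.Nodup) (h2 : cs.Nodup) :
    (pvCells rs cs).Nodup := by
  unfold pvCells
  rw [List.nodup_flatMap]
  constructor
  · intro i _
    exact h2.map (fun a b h => by simpa using congrArg Prod.snd h)
  · apply List.Pairwise.imp ?_ h1
    intro a b hab
    intro p hp hq
    simp only [List.mem_map] at hp hq
    obtain ⟨x, _, rfl⟩ := hp
    obtain ⟨y, _, he⟩ := hq
    exact absurd (congrArg Prod.fst he).symm hab

lemma pvNodup_rowsD (m di : Int) : (pvRowsD m di).Nodup := by
  unfold pvRowsD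
  by_cases h : di = 1
  · rw [if_pos (by simp [h])]
    exact (pvRange_desc_pairwise _ _).imp (fun h => by omega)
  · rw [if_neg (by simp [h])]
    exact (pvRange_asc_pairwise _ _).imp (fun h => by omega)

lemma pvNodup_colsD (n dj : Int) : (pvColsD n dj).Nodup := by
  unfold pvColsD
  by_cases h : dj = 1
  · rw [if_pos (by simp [h])]
    exact (pvRange_desc_pairwise _ _).imp (fun h => by omega)
  · rw [if_neg (by simp [h])]
    exact (pvRange_asc_pairwise _ _).imp (fun h => by omega)

lemma pvRange_nodup (a b : Int) : (PySem.List.pyRange a b).Nodup :=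
  (pvRange_asc_pairwise a b).imp (fun h => by omega)

lemma pvBig_perm (m n : Int) : (pvBigA m n).Perm (pvBigB m n) := by
  have hda : (pvDirsL).Nodup := by decide
  have hndA : (pvBigA m n).Nodup := by
    unfold pvBigA
    rw [List.nodup_flatMap]
    constructor
    · intro c _
      exact hda.map (fun a b h => by simpa using congrArg Prod.snd h)
    · apply List.Pairwise.imp ?_ (pvNodup_cells _ _ (pvRange_nodup 0 m) (pvRange_nodup 0 n))
      intro a b hab p hp hq
      simp only [List.mem_map] at hp hq
      obtain ⟨x, _, rfl⟩ := hp
      obtain ⟨y, _, he⟩ := hq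
      exact absurd (congrArg Prod.fst he).symm hab
  have hndB : (pvBigB m n).Nodup := by
    unfold pvBigB
    rw [List.nodup_flatMap]
    constructor
    · intro d _
      exact (pvNodup_cells _ _ (pvNodup_rowsD m d.1) (pvNodup_colsD n d.2)).map
        (fun a b h => by simpa using congrArg Prod.fst h)
    · apply List.Pairwise.imp ?_ hda
      intro a b hab p hp hq
      simp only [List.mem_map] at hp hq
      obtain ⟨x, _, rfl⟩ := hp
      obtain ⟨y, _, he⟩ := hq
      exact absurd (congrArg Prod.snd he).symm hab
  rw [List.perm_ext_iff_of_nodup hndA hndB]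
  intro p
  unfold pvBigA pvBigB
  simp only [List.mem_flatMap, List.mem_map]
  constructor
  · rintro ⟨c, hc, d, hd, rfl⟩
    obtain ⟨hc1, hc2⟩ := (pvMem_cells _ _ c).mp hc
    refine ⟨d, hd, c, ?_, rfl⟩
    rw [pvMem_cells]
    rw [PySem.List.mem_pyRange_one] at hc1 hc2
    exact ⟨(pvMem_rowsD m d.1 c.1).mpr hc1, (pvMem_colsD n d.2 c.2).mpr hc2⟩
  · rintro ⟨d, hd, c, hc, rfl⟩
    obtain ⟨hc1, hc2⟩ := (pvMem_cells _ _ c).mp hc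
    refine ⟨c, ?_, d, hd, rfl⟩
    rw [pvMem_cells, PySem.List.mem_pyRange_one, PySem.List.mem_pyRange_one]
    exact ⟨(pvMem_rowsD m d.1 c.1).mp hc1, (pvMem_colsD n d.2 c.2).mp hc2⟩

-- folding pvH is insensitive to the order of the candidates
lemma pvH_rcomm (matrix : List (List Int)) (m n : Int) :
    ∀ (r : Int) (p q : (Int × Int) × (Int × Int)),
      pvH matrix m n (pvH matrix m n r p) q = pvH matrix m n (pvH matrix m n r q) p := by
  intro r p q
  unfold pvH pvGStep
  split_ifs <;> simp [max_comm, max_left_comm]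

-- ===== VERDICT (by name: the statement is the Claim_ definition above) =====
theorem find_spec : Claim_equal_find := by
  intro matrix _ _
  unfold Spec_find
  rw [pvA_eq_bigA matrix, pvB_eq_bigB matrix]
  exact @List.Perm.foldl_eq _ _ (pvH matrix _ _) _ _ ⟨pvH_rcomm matrix _ _⟩
    (pvBig_perm _ _) 0
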